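-- pv_equiv track=rewrite | github.com/srajagopalan1204/disc3_ext | src/token_packs.py | detect_family
-- ===== SOURCE A (Python) =====
-- def detect_family(tokens):
--     families = {"thhn":"thhn","mtw":"mtw","xhhw-2":"xhhw-2"}
--     found = []
--     for t in tokens:
--         if t in families:
--             found.append(t)
--         if t == "xhhw" or t == "xhhw2":
--             found.append("xhhw-2")
--     return list(dict.fromkeys(found))
-- ===== SOURCE B (Python) =====
-- def detect_family(tokens):
--     # canonical alias table: every recognised spelling maps to its family name
--     FAM = {"thhn": "thhn", "mtw": "mtw", "xhhw-2": "xhhw-2",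
--            "xhhw": "xhhw-2", "xhhw2": "xhhw-2"}
--     result = []
--     # build the answer back-to-front: each recognised token hoists its family
--     # to the front and drops any later duplicate of it
--     for t in reversed(tokens):
--         fam = FAM.get(t)
--         if fam is not None:
--             result = [fam] + [x for x in result if x != fam]
--     return result
-- ===== Notes on version B (the rewrite author's own statement) =====
-- stated objective: alternative
-- what changed: B folds over the tokens in reverse with one canonical alias dict, prepending each family and filtering its later duplicates out of the accumulator, instead of A's forward pass with two match branches followed by a separate dict.fromkeys dedup pass.
import Mathlib
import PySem

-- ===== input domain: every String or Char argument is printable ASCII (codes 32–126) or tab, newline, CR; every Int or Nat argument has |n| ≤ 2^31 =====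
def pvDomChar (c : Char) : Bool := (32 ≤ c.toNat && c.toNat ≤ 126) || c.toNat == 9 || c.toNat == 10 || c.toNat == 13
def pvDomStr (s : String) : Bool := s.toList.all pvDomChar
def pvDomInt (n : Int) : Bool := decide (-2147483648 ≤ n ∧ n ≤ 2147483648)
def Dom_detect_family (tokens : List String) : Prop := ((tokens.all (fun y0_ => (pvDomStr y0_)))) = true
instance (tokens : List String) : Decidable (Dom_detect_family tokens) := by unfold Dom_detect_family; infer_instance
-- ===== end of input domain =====

-- B folds over the tokens in reverse with one canonical alias dict, prepending each
-- family and filtering later duplicates out of the accumulator, instead of A's forward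
-- pass (two match branches) followed by a separate dict.fromkeys dedup pass. Objective: alternative.

-- ===== PORT A =====
def dfFamilies : PySem.Dict String String :=
  PySem.Dict.ofList [("thhn", "thhn"), ("mtw", "mtw"), ("xhhw-2", "xhhw-2")]

-- one iteration of A's loop body (the two appends, in source order)
def dfStepA (found : List String) (t : String) : List String :=
  let found := if dfFamilies.contains t then found ++ [t] else found
  if t == "xhhw" || t == "xhhw2" then found ++ ["xhhw-2"] else found

def detect_family (tokens : List String) : List String :=
  let found := tokens.foldl dfStepA []
  PySem.List.dedup found   -- list(dict.fromkeys(found))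

-- ===== PORT B =====
def dfFAM : PySem.Dict String String :=
  PySem.Dict.ofList [("thhn", "thhn"), ("mtw", "mtw"), ("xhhw-2", "xhhw-2"),
                     ("xhhw", "xhhw-2"), ("xhhw2", "xhhw-2")]

-- one iteration of B's loop: FAM.get(t); hoist the family, drop its later duplicates
def dfStepB (result : List String) (t : String) : List String :=
  match dfFAM.get? t with
  | none => result
  | some fam => fam :: result.filter (fun x => x != fam)

def detect_family_alt (tokens : List String) : List String :=
  tokens.reverse.foldl dfStepB []   -- for t in reversed(tokens)

-- ===== PRECONDITION & SPEC =====
def Spec_detect_family (tokens : List String) (out : List String) : Prop := out = detect_family_alt tokens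
instance (tokens : List String) (out : List String) : Decidable (Spec_detect_family tokens out) := by unfold Spec_detect_family; infer_instance

-- ===== CLAIM (what is proved, stated in full; the proofs are below) =====
def Claim_equal_detect_family : Prop := ∀ (tokens : List String), Dom_detect_family tokens → Spec_detect_family tokens (detect_family tokens)

-- ===== LEMMAS AND PROOFS =====

-- per-token contribution list (proof-side abstraction of A's loop body)
def dfItems (t : String) : List String :=
  (if dfFamilies.contains t then [t] else []) ++
  (if t == "xhhw" || t == "xhhw2" then ["xhhw-2"] else [])

lemma dfStepA_eq_append (found : List String) (t : String) :
    dfStepA found t = found ++ dfItems t := by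
  unfold dfStepA dfItems
  split_ifs <;> simp

lemma foldA_flat (tokens : List String) (found : List String) :
    tokens.foldl dfStepA found = found ++ tokens.flatMap dfItems := by
  induction tokens generalizing found with
  | nil => simp
  | cons t ts ih => simp [List.foldl, dfStepA_eq_append, ih]

-- A's per-token contributions are exactly B's canonical-dict lookup
lemma dfItems_eq_get (t : String) : dfItems t = (dfFAM.get? t).toList := by
  by_cases h1 : t = "thhn"
  · subst h1; decide
  by_cases h2 : t = "mtw"
  · subst h2; decide
  by_cases h3 : t = "xhhw-2"
  · subst h3; decide
  by_cases h4 : t = "xhhw"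
  · subst h4; decide
  by_cases h5 : t = "xhhw2"
  · subst h5; decide
  have hFams : dfFamilies = PySem.Dict.mk [("thhn", "thhn"), ("mtw", "mtw"), ("xhhw-2", "xhhw-2")] := by decide
  have hFAM : dfFAM = PySem.Dict.mk [("thhn", "thhn"), ("mtw", "mtw"), ("xhhw-2", "xhhw-2"), ("xhhw", "xhhw-2"), ("xhhw2", "xhhw-2")] := by decide
  have e1 : ("thhn" == t) = false := by simp [Ne.symm h1]
  have e2 : ("mtw" == t) = false := by simp [Ne.symm h2]
  have e3 : ("xhhw-2" == t) = false := by simp [Ne.symm h3]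
  have e4 : ("xhhw" == t) = false := by simp [Ne.symm h4]
  have e5 : ("xhhw2" == t) = false := by simp [Ne.symm h5]
  unfold dfItems
  rw [hFams, hFAM]
  simp [PySem.Dict.contains_mk,
        e1, e2, e3, e4, e5, h4, h5, PySem.Dict.get?]

lemma flatMap_toList {α β : Type} (f : α → Option β) (l : List α) :
    l.flatMap (fun a => (f a).toList) = l.filterMap f := by
  induction l with
  | nil => rfl
  | cons a l ih => cases h : f a <;> simp [List.flatMap_cons, h, ih]

-- B unrolled: a right fold of the hoist step over the canonicalised tokens
def dfHoist (fam : String) (acc : List String) : List String :=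
  fam :: acc.filter (fun x => x != fam)

lemma altB_foldr (tokens : List String) :
    detect_family_alt tokens = (tokens.filterMap dfFAM.get?).foldr dfHoist [] := by
  unfold detect_family_alt
  rw [List.foldl_reverse]
  induction tokens with
  | nil => rfl
  | cons t ts ih =>
      rw [List.foldr_cons, ih]
      cases h : dfFAM.get? t <;>
        simp [dfStepB, h, dfHoist]

-- Python's first-occurrence dedup (foldl Set.add) equals the back-to-front hoisting fold
lemma foldl_add_eq (l : List String) (s : PySem.Set String) :
    l.foldl PySem.Set.add s = s ++ (l.foldr dfHoist []).filter (fun x => !(s.contains x)) := by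
  induction l generalizing s with
  | nil => simp
  | cons x xs ih =>
      rw [List.foldl_cons, ih, List.foldr_cons]
      by_cases hx : x ∈ s
      · have hc : s.contains x = true := by simpa using hx
        have hadd : PySem.Set.add s x = s := by simp [PySem.Set.add]; exact hx
        rw [hadd]
        unfold dfHoist
        rw [List.filter_cons_of_neg (by simp; exact hx), List.filter_filter]
        congr 1
        apply List.filter_congr
        intro a _
        by_cases ha : a ∈ s
        · simp [PySem.Set.contains, ha]
        · have hax : a ≠ x := fun e => ha (e ▸ hx)
          simp [PySem.Set.contains, ha, hax]
      · have hc : s.contains x = false := by simpa using hx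
        have hadd : PySem.Set.add s x = s ++ [x] := by simp [PySem.Set.add]; exact hx
        rw [hadd]
        unfold dfHoist
        rw [List.filter_cons_of_pos (by simp; exact hx), List.filter_filter]
        simp only [List.append_assoc, List.singleton_append]
        congr 2
        apply List.filter_congr
        intro a _
        by_cases ha : a ∈ s
        · simp [PySem.Set.contains, List.mem_append, ha]
        · by_cases hax : a = x <;>
            simp [PySem.Set.contains, List.mem_append, ha, hax]

lemma dedup_eq_foldr (l : List String) :
    PySem.List.dedup l = l.foldr dfHoist [] := by
  rw [PySem.List.dedup_eq_ofList, PySem.Set.ofList_eq_foldl]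
  have := foldl_add_eq l PySem.Set.empty
  simpa [PySem.Set.empty, List.filter_eq_self] using this

-- ===== VERDICT (by name: the statement is the Claim_ definition above) =====
theorem detect_family_spec : Claim_equal_detect_family := by
  intro tokens _
  unfold Spec_detect_family detect_family
  rw [foldA_flat, List.nil_append, altB_foldr, ← dedup_eq_foldr]
  rw [← flatMap_toList]
  have : dfItems = fun t => (dfFAM.get? t).toList := funext dfItems_eq_get
  rw [this]
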